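-- pv_equiv track=rewrite | github.com/Hjd213/openclaw-workspace | cs-aimbot-pro.py | predict_target
-- ===== SOURCE A (Python) =====
-- def predict_target(history):
--     """卡尔曼滤波简化版 - 预测目标位置"""
--     if len(history) < 2:
--         return None
--     recent = list(history)[-3:]
--     if len(recent) < 2:
--         return None
--
--     # 简单线性预测
--     dx = sum(recent[i+1]['x'] - recent[i]['x'] for i in range(len(recent)-1)) / (len(recent)-1)
--     dy = sum(recent[i+1]['y'] - recent[i]['y'] for i in range(len(recent)-1)) / (len(recent)-1)
--
--     last = recent[-1]
--     return {'x': int(last['x'] + dx), 'y': int(last['y'] + dy)}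
-- ===== SOURCE B (Python) =====
-- def predict_target(history):
--     """Closed-form linear prediction: telescoped displacement between window endpoints."""
--     if len(history) < 2:
--         return None
--     recent = list(history)[-3:]
--     first = recent[0]
--     last = recent[-1]
--     n = len(recent)
--     dx = (last['x'] - first['x']) / (n - 1)
--     dy = (last['y'] - first['y']) / (n - 1)
--     return {'x': int(last['x'] + dx), 'y': int(last['y'] + dy)}
-- ===== Notes on version B (the rewrite author's own statement) =====
-- stated objective: simpler
-- what changed: The per-step sum of consecutive differences is replaced by the telescoped closed form (last-first)/(n-1) over the window endpoints, and the unreachable second length guard is dropped.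
import Mathlib
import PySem

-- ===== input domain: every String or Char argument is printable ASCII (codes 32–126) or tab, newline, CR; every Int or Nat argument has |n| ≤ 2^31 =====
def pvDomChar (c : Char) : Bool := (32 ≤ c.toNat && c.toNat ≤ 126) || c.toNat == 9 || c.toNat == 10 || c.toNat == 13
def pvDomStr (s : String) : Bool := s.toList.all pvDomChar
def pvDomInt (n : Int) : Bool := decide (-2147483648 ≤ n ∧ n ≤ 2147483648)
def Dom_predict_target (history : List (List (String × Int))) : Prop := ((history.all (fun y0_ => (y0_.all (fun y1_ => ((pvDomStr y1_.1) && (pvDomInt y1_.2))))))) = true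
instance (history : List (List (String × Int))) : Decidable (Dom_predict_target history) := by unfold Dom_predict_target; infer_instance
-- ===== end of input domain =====

-- B replaces A's per-step sum of consecutive differences by the telescoped closed form
-- (last-first)/(n-1); objective: simpler.

-- d[k] for an association-list dict: first match; 0 is never read under Pre_ (KeyError inputs are excluded).
def pvLookup (d : List (String × Int)) (k : String) : Int :=
  ((d.find? (fun p => p.1 == k)).map Prod.snd).getD 0

-- int(base + num/den) for integer base,num and den>0: the float arithmetic is exact on Dom
-- (|values| ≤ 3·2^33 < 2^53) and int() truncates toward zero, i.e. Int.tdiv (T-division).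
def pvTruncAdd (base num den : Int) : Int := Int.tdiv (base * den + num) den

-- ===== PORT A =====
def predict_target (history : List (List (String × Int))) : Option (List (String × Int)) :=
  if history.length < 2 then none
  else
    let recent := PySem.List.slice history (some (-3)) none
    if recent.length < 2 then none
    else
      let k : Int := (recent.length : Int) - 1
      let numx := (PySem.List.pyRange 0 ((recent.length : Int) - 1) 1).foldl
        (fun s i => s + (pvLookup (PySem.List.pyGetD recent (i + 1) []) "x"
                         - pvLookup (PySem.List.pyGetD recent i []) "x")) 0
      let numy := (PySem.List.pyRange 0 ((recent.length : Int) - 1) 1).foldl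
        (fun s i => s + (pvLookup (PySem.List.pyGetD recent (i + 1) []) "y"
                         - pvLookup (PySem.List.pyGetD recent i []) "y")) 0
      let last := PySem.List.pyGetD recent (-1) []
      some [("x", pvTruncAdd (pvLookup last "x") numx k),
            ("y", pvTruncAdd (pvLookup last "y") numy k)]

-- ===== PORT B =====
def predict_target_alt (history : List (List (String × Int))) : Option (List (String × Int)) :=
  if history.length < 2 then none
  else
    let recent := PySem.List.slice history (some (-3)) none
    let first := PySem.List.pyGetD recent 0 []
    let last := PySem.List.pyGetD recent (-1) []
    let k : Int := (recent.length : Int) - 1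
    some [("x", pvTruncAdd (pvLookup last "x") (pvLookup last "x" - pvLookup first "x") k),
          ("y", pvTruncAdd (pvLookup last "y") (pvLookup last "y" - pvLookup first "y") k)]

-- ===== PRECONDITION & SPEC =====
-- Pre_ excludes exactly the inputs where Python A raises KeyError: some accessed window entry lacks key 'x' or 'y'.
def Pre_predict_target (history : List (List (String × Int))) : Prop :=
  history.length < 2 ∨
    ∀ d ∈ history.drop (history.length - 3),
      (d.find? (fun p => p.1 == "x")).isSome ∧ (d.find? (fun p => p.1 == "y")).isSome
instance (history : List (List (String × Int))) : Decidable (Pre_predict_target history) := by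
  unfold Pre_predict_target; infer_instance
def pvWitness_predict_target : (List (List (String × Int))) :=
  [[("x", 0), ("y", 0)], [("x", 3), ("y", -2)]]

def Spec_predict_target (history : List (List (String × Int))) (out : Option (List (String × Int))) : Prop := out = predict_target_alt history
instance (history : List (List (String × Int))) (out : Option (List (String × Int))) : Decidable (Spec_predict_target history out) := by unfold Spec_predict_target; infer_instance

-- ===== CLAIM (what is proved, stated in full; the proofs are below) =====
def Claim_equal_predict_target : Prop := ∀ (history : List (List (String × Int))), Dom_predict_target history → Pre_predict_target history → Spec_predict_target history (predict_target history)

-- ===== LEMMAS AND PROOFS =====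

-- The last-3 window of a list of length ≥ 2 is [a,b] or [a,b,c].
theorem pv_window_shape (l : List (List (String × Int))) (h : 2 ≤ l.length) :
    (∃ a b, l.drop (l.length - 3) = [a, b]) ∨
    (∃ a b c, l.drop (l.length - 3) = [a, b, c]) := by
  have hlen : (l.drop (l.length - 3)).length = l.length - (l.length - 3) := l.length_drop
  by_cases h2 : l.length = 2
  · left
    have h0 : l.length - 3 = 0 := by omega
    obtain ⟨a, b, hab⟩ := List.length_eq_two.mp h2
    exact ⟨a, b, by rw [h0, List.drop_zero, hab]⟩
  · right
    have : (l.drop (l.length - 3)).length = 3 := by omega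
    obtain ⟨a, b, c, h⟩ := List.length_eq_three.mp this
    exact ⟨a, b, c, h⟩

-- ===== VERDICT (by name: the statement is the Claim_ definition above) =====
theorem predict_target_spec : Claim_equal_predict_target := by
  intro history _ _
  unfold Spec_predict_target
  by_cases hlt : history.length < 2
  · simp [predict_target, predict_target_alt, hlt]
  · have h2 : 2 ≤ history.length := by omega
    have hsl : PySem.List.slice history (some (-3)) none = history.drop (history.length - 3) :=
      PySem.List.slice_from_neg_ofNat history 3 (by omega)
    rcases pv_window_shape history h2 with ⟨a, b, hab⟩ | ⟨a, b, c, habc⟩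
    · simp [predict_target, predict_target_alt, hlt, hsl, hab, PySem.List.pyRange_one,
        List.range_succ, PySem.List.pyGetD, PySem.List.pyGet?, PySem.List.pyIdx?]
    · simp [predict_target, predict_target_alt, hlt, hsl, habc, PySem.List.pyRange_one,
        List.range_succ, PySem.List.pyGetD, PySem.List.pyGet?, PySem.List.pyIdx?, pvTruncAdd,
        sub_add_sub_cancel']
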